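-- pv_equiv track=rewrite | github.com/LuisMIguelFurlanettoSousa/Beecrowd | Python/3-STRINGS/1237.py | larger_substring
-- ===== SOURCE A (Python) =====
-- def larger_substring(f1, f2):
--     larguer = 0
--
--     # Gerar todas as substrings possíveis de f1
--     for i in range(len(f1)):
--         for j in range(i + 1, len(f1) + 1):
--             substring = f1[i:j]
--
--             # Contar ocorrências da substring em f2
--             qnt_sub = f2.count(substring)
--             if qnt_sub > larguer:
--                 larguer = qnt_sub
--
--     return larguer
-- ===== SOURCE B (Python) =====
-- def larger_substring(f1, f2):
--     counts = {}
--     for ch in f2: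
--         counts[ch] = counts.get(ch, 0) + 1
--     best = 0
--     for ch in set(f1):
--         c = counts.get(ch, 0)
--         if c > best:
--             best = c
--     return best
-- ===== Notes on version B (the rewrite author's own statement) =====
-- stated objective: faster
-- what changed: Replaced the generate-all-substrings-of-f1-and-count-each-in-f2 double loop by a single character-frequency pass: the maximal count is always attained by a single character, so B builds a counter of f2 once and takes the max frequency over the distinct characters of f1.
import Mathlib
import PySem

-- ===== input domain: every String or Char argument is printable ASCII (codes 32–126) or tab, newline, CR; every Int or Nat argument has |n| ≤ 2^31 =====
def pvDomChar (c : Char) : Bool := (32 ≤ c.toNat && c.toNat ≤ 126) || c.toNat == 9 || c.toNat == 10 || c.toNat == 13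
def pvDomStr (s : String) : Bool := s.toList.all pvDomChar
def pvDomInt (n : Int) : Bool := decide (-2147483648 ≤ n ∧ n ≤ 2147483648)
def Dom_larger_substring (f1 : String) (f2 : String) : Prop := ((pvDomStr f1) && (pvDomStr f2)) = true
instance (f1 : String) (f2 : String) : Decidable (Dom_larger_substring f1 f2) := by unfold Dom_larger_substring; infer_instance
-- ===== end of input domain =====

-- B replaces A's all-substrings-of-f1 double loop (counting each substring in f2) by a single
-- character-frequency pass over f2: the maximal count is always attained by a single character.

-- ===== PORT A =====
def larger_substring (f1 : String) (f2 : String) : Int :=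
  (PySem.List.pyRange 0 (PySem.Str.len f1)).foldl (fun larguer i =>
    (PySem.List.pyRange (i + 1) (PySem.Str.len f1 + 1)).foldl (fun larguer j =>
      let substring := PySem.Str.slice f1 (some i) (some j)
      let qnt_sub : Int := (PySem.Str.count f2 substring : Int)
      if qnt_sub > larguer then qnt_sub else larguer) larguer) 0

-- ===== PORT B =====
def larger_substring_alt (f1 : String) (f2 : String) : Int :=
  let counts := f2.toList.foldl (fun d ch => d.insert ch (d.getD ch 0 + 1))
    (PySem.Dict.empty : PySem.Dict Char Int)
  (PySem.Set.ofList f1.toList).foldl (fun best ch =>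
    let c := counts.getD ch 0
    if c > best then c else best) 0

-- ===== PRECONDITION & SPEC =====
def Spec_larger_substring (f1 : String) (f2 : String) (out : Int) : Prop := out = larger_substring_alt f1 f2
instance (f1 : String) (f2 : String) (out : Int) : Decidable (Spec_larger_substring f1 f2 out) := by unfold Spec_larger_substring; infer_instance

-- ===== CLAIM (what is proved, stated in full; the proofs are below) =====
def Claim_equal_larger_substring : Prop := ∀ (f1 : String) (f2 : String), Dom_larger_substring f1 f2 → Spec_larger_substring f1 f2 (larger_substring f1 f2)

-- ===== LEMMAS AND PROOFS =====

-- `if x > a then x else a` is `max a x`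
theorem pv_if_gt_eq_max (a x : Int) : (if x > a then x else a) = max a x := by
  by_cases h : x > a <;> simp [max_def] <;> omega

-- upper bound for a fold of max
theorem pv_foldl_max_le (l : List Int) (a K : Int) (ha : a ≤ K)
    (h : ∀ x ∈ l, x ≤ K) : l.foldl max a ≤ K := by
  induction l generalizing a with
  | nil => exact ha
  | cons y t ih =>
      exact ih _ (max_le ha (h y (by simp))) (fun x hx => h x (by simp [hx]))

-- the initial accumulator is a lower bound for any step-increasing fold
theorem pv_le_foldl_of_step (F : Int → Int → Int) (l : List Int) (a : Int)
    (h : ∀ a x, x ∈ l → a ≤ F a x) : a ≤ l.foldl F a := by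
  induction l generalizing a with
  | nil => exact le_rfl
  | cons y t ih =>
      exact le_trans (h a y (by simp)) (ih _ (fun a x hx => h a x (by simp [hx])))

-- a value reachable at some member of the list is a lower bound for the fold
theorem pv_le_foldl_of_mem (F : Int → Int → Int) (l : List Int) (a v x : Int)
    (hx : x ∈ l) (hv : ∀ a, v ≤ F a x) (hmono : ∀ a y, y ∈ l → a ≤ F a y) :
    v ≤ l.foldl F a := by
  induction l generalizing a with
  | nil => simp at hx
  | cons y t ih =>
      simp only [List.foldl_cons]
      rcases List.mem_cons.mp hx with h | h
      · subst h
        exact le_trans (hv a) (pv_le_foldl_of_step F t (F a x)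
          (fun a z hz => hmono a z (by simp [hz])))
      · exact ih _ h (fun a z hz => hmono a z (List.mem_cons_of_mem _ hz))

-- str.count of a single character equals the list count of that character
theorem pv_count_go_single (c : Char) (fuel : Nat) :
    ∀ (l : List Char) (acc : Nat), l.length ≤ fuel →
      PySem.Chars.count.go [c] fuel l acc = acc + l.count c := by
  induction fuel with
  | zero =>
      intro l acc h
      have : l = [] := List.eq_nil_of_length_eq_zero (Nat.le_zero.mp h)
      subst this; simp [PySem.Chars.count.go]
  | succ fuel ih =>
      intro l acc h
      cases l with
      | nil => simp [PySem.Chars.count.go]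
      | cons y t =>
          rw [PySem.Chars.count.go.eq_def]
          simp only [List.isPrefixOf]
          by_cases hy : y = c
          · subst hy
            simp only [BEq.rfl, Bool.true_and, if_pos]
            rw [List.length_cons] at h
            rw [ih _ _ (by simpa using Nat.le_of_succ_le_succ h)]
            simp
            omega
          · have hbeq : (c == y) = false := by simp; exact fun h' => hy h'.symm
            simp only [hbeq, Bool.false_and, if_neg Bool.false_ne_true]
            rw [List.length_cons] at h
            rw [ih _ _ (Nat.le_of_succ_le_succ h)]
            simp [hy]

theorem pv_count_single (s : List Char) (c : Char) :
    PySem.Chars.count s [c] = s.count c := by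
  simp only [PySem.Chars.count, List.isEmpty_cons, if_neg Bool.false_ne_true]
  simpa using pv_count_go_single c s.length s 0 le_rfl

-- str.count of any string starting with c is at most the list count of c
theorem pv_count_go_le (c : Char) (t : List Char) (fuel : Nat) :
    ∀ (l : List Char) (acc : Nat),
      PySem.Chars.count.go (c :: t) fuel l acc ≤ acc + l.count c := by
  induction fuel with
  | zero => intro l acc; rw [PySem.Chars.count.go.eq_def]; simp
  | succ fuel ih =>
      intro l acc
      cases l with
      | nil => rw [PySem.Chars.count.go.eq_def]; simp
      | cons y t' =>
          rw [PySem.Chars.count.go.eq_def]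
          simp only []
          by_cases hp : (c :: t).isPrefixOf (y :: t') = true
          · rw [if_pos hp]
            have hy : y = c := by
              rcases List.isPrefixOf_iff_prefix.mp hp with ⟨r, hr⟩
              injection hr with h1 _
              exact h1.symm
            rw [hy]
            have hdrop : List.count c (List.drop (c :: t).length (c :: t')) ≤ List.count c t' := by
              have hs : (List.drop (c :: t).length (c :: t')).Sublist t' := by
                simp only [List.length_cons, List.drop_succ_cons]
                exact List.drop_sublist _ _
              exact List.Sublist.count_le _ hs
            calc PySem.Chars.count.go (c :: t) fuel (List.drop (c :: t).length (c :: t')) (acc + 1)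
                ≤ (acc + 1) + List.count c (List.drop (c :: t).length (c :: t')) := ih _ _
              _ ≤ (acc + 1) + List.count c t' := by omega
              _ = acc + List.count c (c :: t') := by rw [List.count_cons_self]; omega
          · rw [if_neg hp]
            calc PySem.Chars.count.go (c :: t) fuel t' acc ≤ acc + t'.count c := ih _ _
              _ ≤ acc + (y :: t').count c := by simp [List.count_cons]

theorem pv_count_le (s : List Char) (c : Char) (t : List Char) :
    PySem.Chars.count s (c :: t) ≤ s.count c := by
  simp only [PySem.Chars.count, List.isEmpty_cons, if_neg Bool.false_ne_true]
  simpa using pv_count_go_le c t s.length s 0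

-- B's result equals the max of per-character counts over the distinct characters of f1
theorem pv_alt_eq_M (f1 f2 : String) :
    larger_substring_alt f1 f2 =
      ((PySem.Set.ofList f1.toList).map (fun c => (f2.toList.count c : Int))).foldl max 0 := by
  unfold larger_substring_alt
  simp only []
  rw [List.foldl_map]
  apply PySem.List.foldl_congr_mem
  intro acc x _
  rw [PySem.Dict.getD_foldl_insert_add_one]
  simp [pv_if_gt_eq_max]

theorem larger_substring_spec_aux (f1 f2 : String) :
    larger_substring f1 f2 = larger_substring_alt f1 f2 := by
  rw [pv_alt_eq_M]
  set l1 := f1.toList with hl1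
  set l2 := f2.toList with hl2
  set g : Char → Int := fun c => (l2.count c : Int) with hg
  set M : Int := ((PySem.Set.ofList l1).map g).foldl max 0 with hM
  have hM0 : 0 ≤ M := (PySem.List.le_foldl_max _ _).1
  have hMmem : ∀ c ∈ l1, g c ≤ M := by
    intro c hc
    exact (PySem.List.le_foldl_max _ _).2 (g c)
      (List.mem_map_of_mem ((PySem.Set.mem_ofList _ _).mpr hc))
  -- the candidate value of A at indices (i, j)
  set q : Int → Int → Int := fun i j =>
    ((PySem.Str.count f2 (PySem.Str.slice f1 (some i) (some j)) : Nat) : Int) with hq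
  -- the inner loop of A as a function of the accumulator
  set F : Int → Int → Int := fun a i =>
    (PySem.List.pyRange (i + 1) (PySem.Str.len f1 + 1)).foldl
      (fun larguer j => if q i j > larguer then q i j else larguer) a with hF
  have hA : larger_substring f1 f2 = (PySem.List.pyRange 0 (PySem.Str.len f1)).foldl F 0 := rfl
  -- rewrite each inner loop as a fold of max over the mapped candidates
  have hFmax : ∀ a i, F a i =
      ((PySem.List.pyRange (i + 1) (PySem.Str.len f1 + 1)).map (q i)).foldl max a := by
    intro a i
    rw [hF, List.foldl_map]
    apply PySem.List.foldl_congr_mem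
    intro acc x _
    simp [pv_if_gt_eq_max]
  -- every candidate is bounded by the count of its first character
  have hq_le : ∀ (k : Nat) (hk : k < l1.length) (j : Int), (k : Int) < j →
      q (k : Int) j ≤ g l1[k] := by
    intro k hk j hij
    have hj0 : 0 ≤ j := by omega
    obtain ⟨m, rfl⟩ : ∃ m : Nat, j = (m : Int) := ⟨j.toNat, (Int.toNat_of_nonneg hj0).symm⟩
    have hkm : k < m := by exact_mod_cast hij
    rw [hq]
    simp only [PySem.Str.count_eq, PySem.Str.toList_slice, PySem.Chars.slice_eq_listSlice,
      PySem.List.slice_natCast, ← hl1, ← hl2]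
    rw [List.drop_eq_getElem_cons hk]
    obtain ⟨d, hd⟩ : ∃ d : Nat, m - k = d + 1 := ⟨m - k - 1, by omega⟩
    rw [hd, List.take_succ_cons]
    simp only [hg]
    exact_mod_cast pv_count_le l2 l1[k] _
  -- the single-character candidate at j = i + 1 is exactly the character count
  have hq_single : ∀ (k : Nat) (hk : k < l1.length), q (k : Int) ((k : Int) + 1) = g l1[k] := by
    intro k hk
    rw [hq]
    simp only [PySem.Str.count_eq, PySem.Str.toList_slice, PySem.Chars.slice_eq_listSlice]
    have : ((k : Int) + 1) = ((k + 1 : Nat) : Int) := by push_cast; ring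
    rw [this, PySem.List.slice_natCast, ← hl1, ← hl2]
    rw [List.drop_eq_getElem_cons hk]
    have : k + 1 - k = 1 := by omega
    rw [this, List.take_succ_cons, List.take_zero]
    simp only [hg]
    exact_mod_cast congrArg (Nat.cast : Nat → Int) (pv_count_single l2 l1[k])
  have hlen : PySem.Str.len f1 = (l1.length : Int) := by rw [PySem.Str.len_eq, hl1]
  -- A ≤ M
  have hAle : larger_substring f1 f2 ≤ M := by
    rw [hA]
    have : ∀ a : Int, ∀ i ∈ PySem.List.pyRange 0 (PySem.Str.len f1), a ≤ M → F a i ≤ M := by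
      intro a i hi ha
      rw [hFmax]
      apply pv_foldl_max_le _ _ _ ha
      intro x hx
      rcases List.mem_map.mp hx with ⟨j, hj, rfl⟩
      rw [hlen] at hi
      rcases PySem.List.mem_pyRange_one.mp hi with ⟨h0, hilt⟩
      rw [hlen] at hj
      rcases PySem.List.mem_pyRange_one.mp hj with ⟨hj1, _⟩
      obtain ⟨k, rfl⟩ : ∃ k : Nat, i = (k : Int) := ⟨i.toNat, (Int.toNat_of_nonneg h0).symm⟩
      have hk : k < l1.length := by exact_mod_cast hilt
      exact le_trans (hq_le k hk j (by omega)) (hMmem _ (List.getElem_mem hk))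
    -- fold the bound through the outer loop
    have gen : ∀ (l : List Int) (a : Int), (∀ x ∈ l, x ∈ PySem.List.pyRange 0 (PySem.Str.len f1)) →
        a ≤ M → l.foldl F a ≤ M := by
      intro l
      induction l with
      | nil => intro a _ ha; exact ha
      | cons y t ih =>
          intro a hmem ha
          exact ih _ (fun x hx => hmem x (by simp [hx])) (this a y (hmem y (by simp)) ha)
    exact gen _ 0 (fun x hx => hx) hM0
  -- M ≤ A
  have hmono : ∀ (a i : Int), a ≤ F a i := by
    intro a i
    rw [hFmax]
    exact (PySem.List.le_foldl_max _ _).1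
  have hMle : M ≤ larger_substring f1 f2 := by
    rw [hA, hM]
    apply pv_foldl_max_le
    · exact pv_le_foldl_of_step F _ 0 (fun a x _ => hmono a x)
    · intro x hx
      rcases List.mem_map.mp hx with ⟨c, hc, rfl⟩
      have hc1 : c ∈ l1 := (PySem.Set.mem_ofList _ _).mp hc
      rcases List.getElem_of_mem hc1 with ⟨k, hk, hck⟩
      have hmemk : (k : Int) ∈ PySem.List.pyRange 0 (PySem.Str.len f1) := by
        rw [hlen]; exact PySem.List.mem_pyRange_one.mpr ⟨by positivity, by exact_mod_cast hk⟩
      apply pv_le_foldl_of_mem F _ 0 (g c) (k : Int) hmemk _ (fun a y _ => hmono a y)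
      intro a
      rw [hFmax]
      have hval : g c = q (k : Int) ((k : Int) + 1) := by
        rw [hq_single k hk]; simp [hck]
      have hmemj : ((k : Int) + 1) ∈ PySem.List.pyRange ((k : Int) + 1) (PySem.Str.len f1 + 1) := by
        rw [hlen]
        exact PySem.List.mem_pyRange_one.mpr ⟨le_rfl, by exact_mod_cast Nat.add_lt_add_right hk 1⟩
      rw [hval]
      exact (PySem.List.le_foldl_max _ _).2 _ (List.mem_map_of_mem hmemj)
  omega

-- ===== VERDICT (by name: the statement is the Claim_ definition above) =====
theorem larger_substring_spec : Claim_equal_larger_substring := by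
  intro f1 f2 _
  unfold Spec_larger_substring
  exact larger_substring_spec_aux f1 f2
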